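-- pv_equiv track=rewrite | github.com/eliottcassidy2000/math | 04-computation/cycle_count_H_formula.py | compute_c3_c5_fast
-- ===== SOURCE A (Python) =====
-- def compute_c3_c5_fast(p, S):
--     """Fast c_3 and c_5 computation for circulant tournament."""
--     S_set = set(S)
--
--     # c_3: for each triple {i,j,k}, check if it forms a directed 3-cycle
--     c3 = 0
--     for i in range(p):
--         for j in range(i + 1, p):
--             for k in range(j + 1, p):
--                 d_ij = (j - i) % p in S_set
--                 d_jk = (k - j) % p in S_set
--                 d_ki = (i - k) % p in S_set
--                 d_ji = (i - j) % p in S_set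
--                 d_kj = (j - k) % p in S_set
--                 d_ik = (k - i) % p in S_set
--                 if d_ij and d_jk and d_ki:
--                     c3 += 1
--                 if d_ik and d_kj and d_ji:
--                     c3 += 1
--
--     # c_5: use trace formula with correction
--     # tr(A^5) = sum lambda_k^5 = 5*c_5 + 5*(n-3)*c_3 + ...
--     # Actually for tournaments, the correction is more complex
--     # Let's use eigenvalue formula: tr(A^5) counts all closed 5-walks
--     # A closed 5-walk can be:
--     #   (a) A simple 5-cycle (counted 5 times each in tr, total 5*c_5)
--     #   (b) A "lollipop": 3-cycle + back-forth (but A[i,j]*A[j,i]=0 for tournaments!)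
--     # Actually in a tournament, since A[i,j]*A[j,i] = 0, any closed walk
--     # that backtracks is 0. So ALL closed walks in tr(A^k) are simple!
--     # Wait, not simple — they can revisit vertices via different edges.
--
--     # For k=5 in a tournament:
--     # tr(A^5) = sum_{i} (A^5)_{ii} = sum of products along 5-step closed walks
--     # A walk i1->i2->i3->i4->i5->i1 where each step is a tournament edge
--     # This CAN revisit vertices: e.g. i1->i2->i3->i1->i2->i3 is a valid walk
--     # because i1->i2, i2->i3, i3->i1, i1->i2, i2->i3 could all be edges
--     # Wait, i5->i1 means i5=i3, so i3->i1 must be an edge (which it is in the 3-cycle)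
--     # So this walk is i1->i2->i3->i1->i2->i3 with i5=i3, which IS a valid walk
--     # But the walk visits {i1,i2,i3} and is NOT a simple 5-cycle.
--
--     # So tr(A^5) != 5*c_5 in general. We need to correct.
--
--     # Actually for circulant tournaments we can just compute c_5 directly:
--     # c_5 = (p * local_c5) where local_c5 = # directed 5-cycles through vertex 0
--     # And local_c5 = (1/5) * sum over 4-subsets containing 0 of Hamiltonian 5-cycle count
--
--     # Faster: use vertex 0's neighborhood
--     c5 = 0
--     from itertools import combinations, permutations
--     # Only count 5-cycles containing vertex 0 (then multiply by p/5)
--     others = list(range(1, p))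
--     for subset in combinations(others, 4):
--         verts = (0,) + subset
--         for perm in permutations(verts):
--             if perm[0] != 0:
--                 continue  # fix starting vertex to avoid rotation counting
--             is_cycle = True
--             for idx in range(5):
--                 a, b = perm[idx], perm[(idx + 1) % 5]
--                 if (b - a) % p not in S_set:
--                     is_cycle = False
--                     break
--             if is_cycle:
--                 c5 += 1
--     # Each 5-cycle through 0 counted once (fixed start at 0, but 2 directions)
--     # Actually permutations of 5 elements with first fixed = 4! = 24
--     # A 5-cycle has 5 rotations * 1 direction = 5 representations among 5! perms
--     # With first vertex fixed: 1 representation per cycle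
--     # But we also count the reverse cycle (if it exists) — tournament excludes reverse
--     c5 = c5 * p // 5  # p vertices, each 5-cycle contains 5 vertices
--
--     return c3, c5
-- ===== SOURCE B (Python) =====
-- def compute_c3_c5_fast(p, S):
--     """Count directed 3-/5-cycles via circulant translation symmetry:
--     count cycles through vertex 0 over difference tuples, multiply by p, divide by cycle length."""
--     S_set = set(S)
--     # 3-cycles: every 3-cycle is a translate of one through vertex 0 (0 -> d1 -> d1+d2 -> 0).
--     w3 = 0
--     for d1 in range(1, p):
--         if d1 in S_set:
--             for d2 in range(1, p):
--                 if d2 in S_set and d1 + d2 != p and (-d1 - d2) % p in S_set: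
--                     w3 += 1
--     c3 = p * w3 // 3
--     # 5-cycles through vertex 0: enumerate paths 0 -> a -> b -> c -> d -> 0 directly.
--     m0 = 0
--     for a in range(1, p):
--         if a in S_set:
--             for b in range(1, p):
--                 if b != a and (b - a) % p in S_set:
--                     for c in range(1, p):
--                         if c != a and c != b and (c - b) % p in S_set:
--                             for d in range(1, p):
--                                 if d != a and d != b and d != c and (d - c) % p in S_set and (-d) % p in S_set:
--                                     m0 += 1
--     c5 = m0 * p // 5
--     return c3, c5
-- ===== Notes on version B (the rewrite author's own statement) =====
-- stated objective: faster
-- what changed: c3 is obtained by counting difference pairs of 3-cycles through vertex 0 and multiplying by p/3 (translation symmetry of the circulant graph) instead of scanning all O(p^3) triples, and c5 enumerates directed paths 0->a->b->c->d->0 with pruning at each level instead of testing all 120 permutations of every 4-subset.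
import Mathlib
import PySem

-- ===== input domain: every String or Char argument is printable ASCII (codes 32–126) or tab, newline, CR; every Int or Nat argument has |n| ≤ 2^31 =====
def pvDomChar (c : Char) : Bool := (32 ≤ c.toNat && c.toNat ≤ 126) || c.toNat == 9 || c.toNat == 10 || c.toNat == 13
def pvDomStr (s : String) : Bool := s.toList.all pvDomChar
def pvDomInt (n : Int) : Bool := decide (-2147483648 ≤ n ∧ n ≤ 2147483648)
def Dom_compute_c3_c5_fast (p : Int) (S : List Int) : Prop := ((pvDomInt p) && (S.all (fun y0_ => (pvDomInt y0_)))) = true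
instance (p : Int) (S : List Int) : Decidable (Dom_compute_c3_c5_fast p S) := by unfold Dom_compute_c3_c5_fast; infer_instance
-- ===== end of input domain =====

-- B computes both counts from cycles through vertex 0 (translation symmetry of the
-- circulant graph): c3 from difference pairs in O(p^2), c5 by pruned path enumeration
-- instead of A's scan of all 4-subsets times 120 permutations.

-- ===== PORT A =====

def compute_c3_c5_fast (p : Int) (S : List Int) : List Int :=
  let sset : PySem.Set Int := PySem.Set.ofList S
  let c3 : Int := (PySem.List.pyRange 0 p 1).foldl (fun c3 i =>
    (PySem.List.pyRange (i + 1) p 1).foldl (fun c3 j =>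
      (PySem.List.pyRange (j + 1) p 1).foldl (fun c3 k =>
        let d_ij := PySem.Set.contains sset (PySem.Int.mod (j - i) p)
        let d_jk := PySem.Set.contains sset (PySem.Int.mod (k - j) p)
        let d_ki := PySem.Set.contains sset (PySem.Int.mod (i - k) p)
        let d_ji := PySem.Set.contains sset (PySem.Int.mod (i - j) p)
        let d_kj := PySem.Set.contains sset (PySem.Int.mod (j - k) p)
        let d_ik := PySem.Set.contains sset (PySem.Int.mod (k - i) p)
        let c3 := if d_ij && d_jk && d_ki then c3 + 1 else c3
        if d_ik && d_kj && d_ji then c3 + 1 else c3) c3) c3) 0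
  let others := PySem.List.pyRange 1 p 1
  let c5 : Int := (PySem.List.combinations others 4).foldl (fun c5 subset =>
    let verts : List Int := 0 :: subset
    (PySem.List.permutations verts verts.length).foldl (fun c5 perm =>
      if PySem.List.pyGetD perm 0 0 ≠ 0 then c5
      else
        let is_cycle := (PySem.List.pyRange 0 5 1).foldl (fun ic idx =>
          if ic then
            let a := PySem.List.pyGetD perm idx 0
            let b := PySem.List.pyGetD perm (PySem.Int.mod (idx + 1) 5) 0
            if PySem.Set.contains sset (PySem.Int.mod (b - a) p) then ic else false
          else ic) true
        if is_cycle then c5 + 1 else c5) c5) 0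
  let c5 := PySem.Int.floordiv (c5 * p) 5
  [c3, c5]

def compute_c3_c5_fast_alt (p : Int) (S : List Int) : List Int :=
  let sset : PySem.Set Int := PySem.Set.ofList S
  let w3 : Int := (PySem.List.pyRange 1 p 1).foldl (fun w3 d1 =>
    if PySem.Set.contains sset d1 then
      (PySem.List.pyRange 1 p 1).foldl (fun w3 d2 =>
        if PySem.Set.contains sset d2 && !(d1 + d2 == p) &&
            PySem.Set.contains sset (PySem.Int.mod (-d1 - d2) p) then w3 + 1 else w3) w3
    else w3) 0
  let c3 := PySem.Int.floordiv (p * w3) 3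
  let m0 : Int := (PySem.List.pyRange 1 p 1).foldl (fun m0 a =>
    if PySem.Set.contains sset a then
      (PySem.List.pyRange 1 p 1).foldl (fun m0 b =>
        if !(b == a) && PySem.Set.contains sset (PySem.Int.mod (b - a) p) then
          (PySem.List.pyRange 1 p 1).foldl (fun m0 c =>
            if !(c == a) && !(c == b) && PySem.Set.contains sset (PySem.Int.mod (c - b) p) then
              (PySem.List.pyRange 1 p 1).foldl (fun m0 d =>
                if !(d == a) && !(d == b) && !(d == c) &&
                    PySem.Set.contains sset (PySem.Int.mod (d - c) p) &&
                    PySem.Set.contains sset (PySem.Int.mod (-d) p) then m0 + 1 else m0) m0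
            else m0) m0
        else m0) m0
    else m0) 0
  let c5 := PySem.Int.floordiv (m0 * p) 5
  [c3, c5]


-- ===== PRECONDITION & SPEC =====
def Spec_compute_c3_c5_fast (p : Int) (S : List Int) (out : List Int) : Prop := out = compute_c3_c5_fast_alt p S
instance (p : Int) (S : List Int) (out : List Int) : Decidable (Spec_compute_c3_c5_fast p S out) := by unfold Spec_compute_c3_c5_fast; infer_instance

-- ===== CLAIM (what is proved, stated in full; the proofs are below) =====
def Claim_equal_compute_c3_c5_fast : Prop := ∀ (p : Int) (S : List Int), Dom_compute_c3_c5_fast p S → Spec_compute_c3_c5_fast p S (compute_c3_c5_fast p S)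

-- ===== LEMMAS AND PROOFS =====

-- chi and E
def pvChi (m : Int → Bool) (d : Int) : Int := if m d then 1 else 0

lemma pv_Ico_succ_sum (a b : ℤ) (h : a ≤ b) (f : ℤ → ℤ) :
    ∑ k ∈ Finset.Ico a (b + 1), f k = ∑ k ∈ Finset.Ico a b, f k + f b := by
  have hins : Finset.Ico a (b+1) = insert b (Finset.Ico a b) := by
    ext x; simp only [Finset.mem_Ico, Finset.mem_insert]; omega
  rw [hins, Finset.sum_insert (by simp [Finset.mem_Ico])]
  ring

lemma pv_sum_pyRange_aux (f : Int → Int) (n : Nat) : ∀ a : Int,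
    ((PySem.List.pyRange a (a + n) 1).map f).sum = ∑ x ∈ Finset.Ico a (a + (n:Int)), f x := by
  induction n with
  | zero => intro a; simp [PySem.List.pyRange_one_eq_nil (by omega : a + ((0:Nat):Int) ≤ a)]
  | succ k ih =>
      intro a
      have h1 : a + ((k+1 : Nat) : Int) = (a + (k:Nat)) + 1 := by push_cast; ring
      rw [h1, PySem.List.pyRange_one_succ_right (by omega), List.map_append,
        List.sum_append, pv_Ico_succ_sum a (a + (k:Nat)) (by omega), ih a]
      simp

lemma pv_sum_pyRange (f : Int → Int) (a b : Int) :
    ((PySem.List.pyRange a b 1).map f).sum = ∑ x ∈ Finset.Ico a b, f x := by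
  by_cases h : b ≤ a
  · rw [PySem.List.pyRange_one_eq_nil h, Finset.Ico_eq_empty (by omega)]; simp
  · have hb : b = a + ((b - a).toNat : Int) := by omega
    rw [hb]; exact pv_sum_pyRange_aux f _ a

lemma pv_sum_flatMap {α β : Type} (l : List α) (f : α → List β) (F : β → Int) :
    ((l.flatMap f).map F).sum = (l.map (fun x => ((f x).map F).sum)).sum := by
  induction l with
  | nil => simp
  | cons x t ih => simp [List.flatMap_cons, ih]

lemma pv_sum_filter {α : Type} (l : List α) (P : α → Bool) (F : α → Int) :
    ((l.filter P).map F).sum = (l.map (fun x => if P x then F x else 0)).sum := by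
  induction l with
  | nil => simp
  | cons x t ih =>
      by_cases h : P x <;> simp [List.filter_cons, h, ih]

lemma pv_map_range_sum {α : Type} (l : List α) (G : Nat → Int) (H : α → Int)
    (hG : ∀ (i : Nat) (h : i < l.length), G i = H l[i]) :
    ((List.range l.length).map G).sum = (l.map H).sum := by
  induction l generalizing G with
  | nil => simp
  | cons x t ih =>
      rw [List.length_cons, List.range_succ_eq_map]
      simp only [List.map_cons, List.map_map, List.sum_cons]
      rw [hG 0 (by simp), ih (G ∘ Nat.succ) (fun i h => by
        simpa [Function.comp] using hG (i+1) (by simpa using Nat.succ_lt_succ h))]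
      simp

lemma pv_ite_and3 (x y z : Bool) :
    (if (x && y && z) then (1:ℤ) else 0)
      = (if x then (1:ℤ) else 0) * (if y then (1:ℤ) else 0) * (if z then (1:ℤ) else 0) := by
  cases x <;> cases y <;> cases z <;> simp

lemma pv_eraseIdx_eq_erase (xs : List Int) (hnd : xs.Nodup) :
    ∀ (i : Nat) (h : i < xs.length), xs.eraseIdx i = xs.erase xs[i] := by
  induction xs with
  | nil => intro i h; simp at h
  | cons x t ih =>
      intro i h
      cases i with
      | zero => simp
      | succ j =>
          have hj : j < t.length := by simpa using h
          have hxt : x ∉ t := (List.nodup_cons.mp hnd).1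
          have hne : x ≠ t[j] := fun he => hxt (he ▸ List.getElem_mem hj)
          simp only [List.eraseIdx_cons_succ, List.getElem_cons_succ]
          rw [List.erase_cons_tail (by simpa using hne), ih (List.nodup_cons.mp hnd).2 j hj]

lemma pv_mem_permutations (r : Nat) : ∀ (xs : List Int), xs.Nodup → ∀ (q : List Int),
    (q ∈ PySem.List.permutations xs r ↔ q.length = r ∧ q.Nodup ∧ ∀ x ∈ q, x ∈ xs) := by
  induction r with
  | zero =>
      intro xs hnd q
      simp only [PySem.List.permutations_zero, List.mem_singleton]
      constructor
      · rintro rfl; simp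
      · rintro ⟨h1, -, -⟩; exact List.length_eq_zero_iff.mp h1
  | succ r ih =>
      intro xs hnd q
      rw [PySem.List.permutations_succ]
      simp only [List.mem_flatMap, List.mem_range]
      constructor
      · rintro ⟨i, hi, hq⟩
        rw [List.getElem?_eq_getElem hi] at hq
        simp only [List.mem_map] at hq
        obtain ⟨q', hq', rfl⟩ := hq
        have hsub : (xs.eraseIdx i).Sublist xs := List.eraseIdx_sublist xs i
        have hnd' : (xs.eraseIdx i).Nodup := hsub.nodup hnd
        obtain ⟨hl, hn, hm⟩ := (ih _ hnd' q').mp hq'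
        refine ⟨by simp [hl], ?_, ?_⟩
        · rw [List.nodup_cons]
          refine ⟨fun hmem => ?_, hn⟩
          have : xs[i] ∈ xs.erase xs[i] := by
            rw [← pv_eraseIdx_eq_erase xs hnd i hi]; exact hm _ hmem
          exact hnd.not_mem_erase this
        · intro x hx
          rcases List.mem_cons.mp hx with rfl | hx'
          · exact List.getElem_mem hi
          · exact hsub.subset (hm _ hx')
      · rintro ⟨hl, hn, hm⟩
        cases q with
        | nil => simp at hl
        | cons a q' =>
            obtain ⟨i, hi, ha⟩ := List.mem_iff_getElem.mp (hm a (List.mem_cons_self))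
            refine ⟨i, hi, ?_⟩
            rw [List.getElem?_eq_getElem hi]
            simp only [List.mem_map]
            refine ⟨q', ?_, by rw [ha]⟩
            have hnd' : (xs.eraseIdx i).Nodup := (List.eraseIdx_sublist xs i).nodup hnd
            rw [ih _ hnd' q']
            have hna : a ∉ q' := (List.nodup_cons.mp hn).1
            refine ⟨by simpa using hl, (List.nodup_cons.mp hn).2, fun x hx => ?_⟩
            rw [pv_eraseIdx_eq_erase xs hnd i hi, ha]
            have hxa : x ≠ a := fun he => hna (he ▸ hx)
            exact (List.mem_erase_of_ne hxa).mpr (hm x (List.mem_cons_of_mem a hx))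

lemma pv_nodup_permutations (r : Nat) : ∀ (xs : List Int), xs.Nodup →
    (PySem.List.permutations xs r).Nodup := by
  induction r with
  | zero => intro xs _; simp [PySem.List.permutations_zero]
  | succ r ih =>
      intro xs hnd
      rw [PySem.List.permutations_succ, List.nodup_flatMap]
      constructor
      · intro i hi
        rcases Nat.lt_or_ge i xs.length with h | h
        · rw [List.getElem?_eq_getElem h]
          exact (ih _ ((List.eraseIdx_sublist xs i).nodup hnd)).map
            (fun a b hab => by simpa using hab)
        · rw [List.getElem?_eq_none h]; simp
      · refine List.pairwise_lt_range.imp ?_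
        intro i j hij
        rcases Nat.lt_or_ge j xs.length with hj | hj
        · have hi : i < xs.length := lt_trans hij hj
          intro q hqi hqj
          simp only [List.getElem?_eq_getElem hi, List.getElem?_eq_getElem hj,
            List.mem_map] at hqi hqj
          obtain ⟨q1, -, hq1⟩ := hqi
          obtain ⟨q2, -, hq2⟩ := hqj
          have : xs[i] = xs[j] := by
            have := hq1.trans hq2.symm
            exact (List.cons_eq_cons.mp this).1
          exact absurd ((hnd.getElem_inj_iff).mp this) (Nat.ne_of_lt hij)
        · intro q hqi hqj
          simp only [List.getElem?_eq_none hj] at hqj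
          simp at hqj

lemma pv_nodup_combinations : ∀ (xs : List Int), xs.Nodup → ∀ (r : Nat),
    (PySem.List.combinations xs r).Nodup := by
  intro xs
  induction xs with
  | nil =>
      intro _ r
      cases r with
      | zero => simp [PySem.List.combinations_zero]
      | succ r => simp [PySem.List.combinations_nil_succ]
  | cons x t ih =>
      intro hnd r
      cases r with
      | zero => simp [PySem.List.combinations_zero]
      | succ r =>
          rw [PySem.List.combinations_cons_succ]
          have hxt : x ∉ t := (List.nodup_cons.mp hnd).1
          have hndt : t.Nodup := (List.nodup_cons.mp hnd).2
          refine List.Nodup.append ((ih hndt r).map (fun a b hab => by simpa using hab))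
            (ih hndt (r+1)) ?_
          intro c hc1 hc2
          simp only [List.mem_map] at hc1
          obtain ⟨c', -, rfl⟩ := hc1
          have hsub := ((PySem.List.mem_combinations_iff t (r+1) _).mp hc2).1
          exact hxt (hsub.subset (List.mem_cons_self))

lemma pv_sublist_perm_eq : ∀ (xs : List Int), xs.Nodup → ∀ (c1 c2 : List Int),
    c1.Sublist xs → c2.Sublist xs → c1.Perm c2 → c1 = c2 := by
  intro xs
  induction xs with
  | nil =>
      intro _ c1 c2 h1 h2 _
      rw [List.sublist_nil.mp h1, List.sublist_nil.mp h2]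
  | cons x t ih =>
      intro hnd c1 c2 h1 h2 hp
      have hxt : x ∉ t := (List.nodup_cons.mp hnd).1
      have hndt : t.Nodup := (List.nodup_cons.mp hnd).2
      cases h1 with
      | cons _ h1' =>
          cases h2 with
          | cons _ h2' => exact ih hndt c1 c2 h1' h2' hp
          | cons₂ _ h2' =>
              exfalso
              exact hxt (h1'.subset (hp.symm.subset List.mem_cons_self))
      | cons₂ _ h1' =>
          cases h2 with
          | cons _ h2' =>
              exfalso
              exact hxt (h2'.subset (hp.subset List.mem_cons_self))
          | cons₂ _ h2' =>
              rw [ih hndt _ _ h1' h2' ((List.perm_cons x).mp hp)]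

lemma pv_perm_of_conditions (c q : List Int) (hndc : c.Nodup) (hndq : q.Nodup)
    (hlen : q.length = c.length) (hsub : ∀ x ∈ q, x ∈ c) : q.Perm c :=
  (hndq.subperm (fun _ hx => hsub _ hx)).perm_of_length_le (le_of_eq hlen.symm)

lemma pv_comb_flatMap_perm (xs : List Int) (hnd : xs.Nodup) (r : Nat) :
    ((PySem.List.combinations xs r).flatMap (fun c => PySem.List.permutations c r)).Perm
      (PySem.List.permutations xs r) := by
  have hcnd : ∀ c ∈ PySem.List.combinations xs r, c.Nodup ∧ c.Sublist xs ∧ c.length = r := by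
    intro c hc
    obtain ⟨hs, hl⟩ := (PySem.List.mem_combinations_iff xs r c).mp hc
    exact ⟨hs.nodup hnd, hs, hl⟩
  rw [List.perm_ext_iff_of_nodup ?_ (pv_nodup_permutations r xs hnd)]
  · intro q
    rw [List.mem_flatMap, pv_mem_permutations r xs hnd q]
    constructor
    · rintro ⟨c, hc, hq⟩
      obtain ⟨hcn, hcs, hcl⟩ := hcnd c hc
      obtain ⟨h1, h2, h3⟩ := (pv_mem_permutations r c hcn q).mp hq
      exact ⟨h1, h2, fun x hx => hcs.subset (h3 x hx)⟩
    · rintro ⟨h1, h2, h3⟩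
      refine ⟨xs.filter (fun x => decide (x ∈ q)), ?_, ?_⟩
      · rw [PySem.List.mem_combinations_iff]
        refine ⟨List.filter_sublist, ?_⟩
        have hperm : (xs.filter (fun x => decide (x ∈ q))).Perm q := by
          rw [List.perm_ext_iff_of_nodup (hnd.filter _) h2]
          intro a
          simp only [List.mem_filter, decide_eq_true_eq]
          exact ⟨fun h => h.2, fun h => ⟨h3 a h, h⟩⟩
        rw [hperm.length_eq, h1]
      · rw [pv_mem_permutations r _ (hnd.filter _) q]
        have hperm : (xs.filter (fun x => decide (x ∈ q))).Perm q := by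
          rw [List.perm_ext_iff_of_nodup (hnd.filter _) h2]
          intro a
          simp only [List.mem_filter, decide_eq_true_eq]
          exact ⟨fun h => h.2, fun h => ⟨h3 a h, h⟩⟩
        refine ⟨h1, h2, fun x hx => ?_⟩
        simp only [List.mem_filter, decide_eq_true_eq]
        exact ⟨h3 x hx, hx⟩
  · rw [List.nodup_flatMap]
    constructor
    · intro c hc
      exact pv_nodup_permutations r c (hcnd c hc).1
    · have hndc := pv_nodup_combinations xs hnd r
      refine hndc.imp_of_mem ?_
      intro c1 c2 h1 h2 hne q hq1 hq2
      obtain ⟨hc1n, hc1s, hc1l⟩ := hcnd c1 h1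
      obtain ⟨hc2n, hc2s, hc2l⟩ := hcnd c2 h2
      obtain ⟨l1, n1, m1⟩ := (pv_mem_permutations r c1 hc1n q).mp hq1
      obtain ⟨l2, n2, m2⟩ := (pv_mem_permutations r c2 hc2n q).mp hq2
      have p1 : q.Perm c1 := pv_perm_of_conditions c1 q hc1n n1 (by omega) m1
      have p2 : q.Perm c2 := pv_perm_of_conditions c2 q hc2n n2 (by omega) m2
      exact hne (pv_sublist_perm_eq xs hnd c1 c2 hc1s hc2s (p1.symm.trans p2))

lemma pv_big (xs : List Int) (hnd : xs.Nodup) (r : Nat) (F : List Int → Int) :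
    ((PySem.List.combinations xs r).map
        (fun c => ((PySem.List.permutations c r).map F).sum)).sum
      = ((PySem.List.permutations xs r).map F).sum := by
  rw [← pv_sum_flatMap]
  exact ((pv_comb_flatMap_perm xs hnd r).map F).sum_eq

lemma pv_step (ys : List Int) (hnd : ys.Nodup) (r : Nat) (F : List Int → Int) :
    ((PySem.List.permutations ys (r+1)).map F).sum
      = (ys.map (fun a =>
          ((PySem.List.permutations (ys.erase a) r).map (fun q => F (a::q))).sum)).sum := by
  rw [PySem.List.permutations_succ, pv_sum_flatMap]
  apply pv_map_range_sum
  intro i h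
  simp only [List.getElem?_eq_getElem h, List.map_map]
  rw [← pv_eraseIdx_eq_erase ys hnd i h]
  rfl

def pvIC (m : Int → Bool) (p : Int) (perm : List Int) : Bool :=
  (PySem.List.pyRange 0 5 1).foldl (fun ic idx =>
    if ic then
      let a := PySem.List.pyGetD perm idx 0
      let b := PySem.List.pyGetD perm (PySem.Int.mod (idx + 1) 5) 0
      if m (PySem.Int.mod (b - a) p) then ic else false
    else ic) true

lemma pv_pyRange05 : PySem.List.pyRange 0 5 1 = [0, 1, 2, 3, 4] := by decide

lemma pvIC_eval (m : Int → Bool) (p a b c d : Int) :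
    pvIC m p [0, a, b, c, d]
      = (m (PySem.Int.mod (a - 0) p) && m (PySem.Int.mod (b - a) p) &&
         m (PySem.Int.mod (c - b) p) && m (PySem.Int.mod (d - c) p) &&
         m (PySem.Int.mod (0 - d) p)) := by
  have h1 : PySem.Int.mod (0 + 1) 5 = 1 := by decide
  have h2 : PySem.Int.mod (1 + 1) 5 = 2 := by decide
  have h3 : PySem.Int.mod (2 + 1) 5 = 3 := by decide
  have h4 : PySem.Int.mod (3 + 1) 5 = 4 := by decide
  have h5 : PySem.Int.mod (4 + 1) 5 = 0 := by decide
  simp only [pvIC, pv_pyRange05, List.foldl_cons, List.foldl_nil, h1, h2, h3, h4, h5]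
  cases hm1 : m (PySem.Int.mod (PySem.List.pyGetD [0,a,b,c,d] 1 0 - PySem.List.pyGetD [0,a,b,c,d] 0 0) p) <;>
  cases hm2 : m (PySem.Int.mod (PySem.List.pyGetD [0,a,b,c,d] 2 0 - PySem.List.pyGetD [0,a,b,c,d] 1 0) p) <;>
  cases hm3 : m (PySem.Int.mod (PySem.List.pyGetD [0,a,b,c,d] 3 0 - PySem.List.pyGetD [0,a,b,c,d] 2 0) p) <;>
  cases hm4 : m (PySem.Int.mod (PySem.List.pyGetD [0,a,b,c,d] 4 0 - PySem.List.pyGetD [0,a,b,c,d] 3 0) p) <;>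
  cases hm5 : m (PySem.Int.mod (PySem.List.pyGetD [0,a,b,c,d] 0 0 - PySem.List.pyGetD [0,a,b,c,d] 4 0) p) <;>
  simp_all [PySem.List.pyGetD]

lemma pv_he (cs : List Int) (h0 : (0:Int) ∉ cs) (F : List Int → Int) :
    ((PySem.List.permutations ((0:Int) :: cs) (cs.length + 1)).map
        (fun q => if PySem.List.pyGetD q 0 0 ≠ 0 then 0 else F q)).sum
      = ((PySem.List.permutations cs cs.length).map (fun q => F ((0:Int) :: q))).sum := by
  rw [PySem.List.permutations_succ, pv_sum_flatMap]
  have hlen : ((0:Int) :: cs).length = cs.length + 1 := rfl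
  rw [hlen]
  rw [List.map_congr_left (l := List.range (cs.length + 1))
    (g := fun i => if i = 0
      then ((PySem.List.permutations cs cs.length).map (fun q => F ((0:Int) :: q))).sum
      else 0) ?_]
  · rw [List.range_succ_eq_map]
    simp only [List.map_cons, List.sum_cons, if_pos rfl, List.map_map]
    have : ∀ v ∈ (List.range cs.length).map
        ((fun i => if i = 0
          then ((PySem.List.permutations cs cs.length).map (fun q => F ((0:Int) :: q))).sum
          else 0) ∘ Nat.succ), v = 0 := by
      intro v hv
      simp only [List.mem_map, Function.comp] at hv
      obtain ⟨j, -, rfl⟩ := hv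
      simp
    rw [List.sum_eq_zero this]
    simp
  · intro i hi
    rcases i with _ | j
    · simp only [List.getElem?_cons_zero, List.eraseIdx_cons_zero, List.map_map, if_pos rfl]
      congr 1
      apply List.map_congr_left
      intro q hq
      simp [PySem.List.pyGetD]
    · simp only [if_neg (Nat.succ_ne_zero j)]
      rcases Nat.lt_or_ge j cs.length with hj | hj
      · have hsome : ((0:Int) :: cs)[j+1]? = some (cs.get ⟨j, hj⟩) := by
          simp [List.getElem?_cons_succ, List.getElem?_eq_getElem hj]
        simp only [hsome]
        apply List.sum_eq_zero
        intro v hv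
        simp only [List.map_map, List.mem_map, Function.comp] at hv
        obtain ⟨q', -, rfl⟩ := hv
        have hne : ¬ (cs[j] = 0) := fun he => h0 (he ▸ List.getElem_mem hj)
        simp [PySem.List.pyGetD, hne]
      · have hnone : ((0:Int) :: cs)[j+1]? = none := by
          simp [List.getElem?_eq_none, hj]
        simp only [hnone]
        simp

def pvE (m : Int → Bool) (p x y : Int) : Int := pvChi m ((y - x) % p)

lemma pv_nested3 (p : Int) (f : ℤ → ℤ → ℤ → ℤ) :
    ∑ t ∈ ((Finset.Ico (0:ℤ) p) ×ˢ (Finset.Ico (0:ℤ) p) ×ˢ (Finset.Ico (0:ℤ) p)).filter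
        (fun t => t.1 < t.2.1 ∧ t.2.1 < t.2.2), f t.1 t.2.1 t.2.2
      = ∑ i ∈ Finset.Ico (0:ℤ) p, ∑ j ∈ Finset.Ico (i+1) p, ∑ k ∈ Finset.Ico (j+1) p, f i j k := by
  rw [Finset.sum_filter, Finset.sum_product]
  apply Finset.sum_congr rfl
  intro i hi
  rw [Finset.sum_product]
  have hIj : Finset.Ico (i+1) p = (Finset.Ico (0:ℤ) p).filter (fun j => i < j) := by
    ext j; simp only [Finset.mem_Ico, Finset.mem_filter]
    have : 0 ≤ i := (Finset.mem_Ico.mp hi).1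
    omega
  rw [hIj, Finset.sum_filter]
  apply Finset.sum_congr rfl
  intro j hj
  have hIk : Finset.Ico (j+1) p = (Finset.Ico (0:ℤ) p).filter (fun k => j < k) := by
    ext k; simp only [Finset.mem_Ico, Finset.mem_filter]
    have : 0 ≤ j := (Finset.mem_Ico.mp hj).1
    omega
  rw [hIk, Finset.sum_filter]
  by_cases hij : i < j
  · simp only [if_pos hij]
    apply Finset.sum_congr rfl
    intro k hk
    by_cases hjk : j < k <;> simp [hij, hjk]
  · simp only [if_neg hij]
    rw [Finset.sum_eq_zero]
    intro k hk
    simp [hij]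

-- one order-type class of distinct triples, re-indexed by the sorted triple
lemma pv_class (p : Int) (F : ℤ × ℤ × ℤ → ℤ) (C : ℤ × ℤ × ℤ → Prop) [DecidablePred C]
    (σ τ : ℤ × ℤ × ℤ → ℤ × ℤ × ℤ)
    (hστ : ∀ s, σ (τ s) = s) (hτσ : ∀ s, τ (σ s) = s)
    (hmem1 : ∀ t, t ∈ ((Finset.Ico (0:ℤ) p) ×ˢ (Finset.Ico (0:ℤ) p) ×ˢ (Finset.Ico (0:ℤ) p)) →
      C t → (τ t ∈ ((Finset.Ico (0:ℤ) p) ×ˢ (Finset.Ico (0:ℤ) p) ×ˢ (Finset.Ico (0:ℤ) p)) ∧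
        (τ t).1 < (τ t).2.1 ∧ (τ t).2.1 < (τ t).2.2))
    (hmem2 : ∀ s, s ∈ ((Finset.Ico (0:ℤ) p) ×ˢ (Finset.Ico (0:ℤ) p) ×ˢ (Finset.Ico (0:ℤ) p)) →
      s.1 < s.2.1 → s.2.1 < s.2.2 →
      (σ s ∈ ((Finset.Ico (0:ℤ) p) ×ˢ (Finset.Ico (0:ℤ) p) ×ˢ (Finset.Ico (0:ℤ) p)) ∧ C (σ s))) :
    ∑ t ∈ (((Finset.Ico (0:ℤ) p) ×ˢ (Finset.Ico (0:ℤ) p) ×ˢ (Finset.Ico (0:ℤ) p)).filter C), F t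
      = ∑ s ∈ (((Finset.Ico (0:ℤ) p) ×ˢ (Finset.Ico (0:ℤ) p) ×ˢ (Finset.Ico (0:ℤ) p)).filter
          (fun s => s.1 < s.2.1 ∧ s.2.1 < s.2.2)), F (σ s) := by
  apply Finset.sum_nbij' (i := τ) (j := σ)
  · intro a ha
    obtain ⟨h1, h2⟩ := Finset.mem_filter.mp ha
    obtain ⟨h3, h4, h5⟩ := hmem1 a h1 h2
    exact Finset.mem_filter.mpr ⟨h3, h4, h5⟩
  · intro s hs
    obtain ⟨h1, h2, h3⟩ := Finset.mem_filter.mp hs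
    obtain ⟨h4, h5⟩ := hmem2 s h1 h2 h3
    exact Finset.mem_filter.mpr ⟨h4, h5⟩
  · intro a _; exact hστ a
  · intro s _; exact hτσ s
  · intro a _; rw [hστ a]

lemma pv_D_split (p : Int) (m : Int → Bool) :
    ∑ t ∈ (((Finset.Ico (0:ℤ) p) ×ˢ (Finset.Ico (0:ℤ) p) ×ˢ (Finset.Ico (0:ℤ) p)).filter
        (fun t => t.1 ≠ t.2.1 ∧ t.1 ≠ t.2.2 ∧ t.2.1 ≠ t.2.2)),
        (pvE m p t.1 t.2.1 * pvE m p t.2.1 t.2.2 * pvE m p t.2.2 t.1)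
      = 3 * ∑ s ∈ (((Finset.Ico (0:ℤ) p) ×ˢ (Finset.Ico (0:ℤ) p) ×ˢ (Finset.Ico (0:ℤ) p)).filter
          (fun s => s.1 < s.2.1 ∧ s.2.1 < s.2.2)),
          (pvE m p s.1 s.2.1 * pvE m p s.2.1 s.2.2 * pvE m p s.2.2 s.1
            + pvE m p s.1 s.2.2 * pvE m p s.2.2 s.2.1 * pvE m p s.2.1 s.1) := by
  have hpoint : ∀ t ∈ ((Finset.Ico (0:ℤ) p) ×ˢ (Finset.Ico (0:ℤ) p) ×ˢ (Finset.Ico (0:ℤ) p)),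
      (if (t.1 ≠ t.2.1 ∧ t.1 ≠ t.2.2 ∧ t.2.1 ≠ t.2.2)
        then pvE m p t.1 t.2.1 * pvE m p t.2.1 t.2.2 * pvE m p t.2.2 t.1 else 0)
      = (if (t.1 < t.2.1 ∧ t.2.1 < t.2.2) then pvE m p t.1 t.2.1 * pvE m p t.2.1 t.2.2 * pvE m p t.2.2 t.1 else 0)
      + (if (t.1 < t.2.2 ∧ t.2.2 < t.2.1) then pvE m p t.1 t.2.1 * pvE m p t.2.1 t.2.2 * pvE m p t.2.2 t.1 else 0)
      + (if (t.2.2 < t.1 ∧ t.1 < t.2.1) then pvE m p t.1 t.2.1 * pvE m p t.2.1 t.2.2 * pvE m p t.2.2 t.1 else 0)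
      + (if (t.2.1 < t.1 ∧ t.1 < t.2.2) then pvE m p t.1 t.2.1 * pvE m p t.2.1 t.2.2 * pvE m p t.2.2 t.1 else 0)
      + (if (t.2.1 < t.2.2 ∧ t.2.2 < t.1) then pvE m p t.1 t.2.1 * pvE m p t.2.1 t.2.2 * pvE m p t.2.2 t.1 else 0)
      + (if (t.2.2 < t.2.1 ∧ t.2.1 < t.1) then pvE m p t.1 t.2.1 * pvE m p t.2.1 t.2.2 * pvE m p t.2.2 t.1 else 0) := by
    intro t _
    split_ifs <;> first | omega | ring
  rw [Finset.sum_filter, Finset.sum_congr rfl hpoint]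
  rw [Finset.sum_add_distrib, Finset.sum_add_distrib, Finset.sum_add_distrib,
    Finset.sum_add_distrib, Finset.sum_add_distrib]
  rw [← Finset.sum_filter, ← Finset.sum_filter, ← Finset.sum_filter, ← Finset.sum_filter,
    ← Finset.sum_filter, ← Finset.sum_filter]
  rw [pv_class p _ (fun t => t.1 < t.2.2 ∧ t.2.2 < t.2.1)
    (fun s => (s.1, s.2.2, s.2.1)) (fun t => (t.1, t.2.2, t.2.1))
    (fun s => rfl) (fun s => rfl)
    (by intro t h1 h2
        simp only [Finset.mem_product, Finset.mem_Ico] at h1 ⊢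
        exact ⟨⟨h1.1, h1.2.2, h1.2.1⟩, h2.1, h2.2⟩)
    (by intro s h1 h2 h3
        simp only [Finset.mem_product, Finset.mem_Ico] at h1 ⊢
        exact ⟨⟨h1.1, h1.2.2, h1.2.1⟩, h2, h3⟩)]
  rw [pv_class p _ (fun t => t.2.2 < t.1 ∧ t.1 < t.2.1)
    (fun s => (s.2.1, s.2.2, s.1)) (fun t => (t.2.2, t.1, t.2.1))
    (fun s => rfl) (fun s => rfl)
    (by intro t h1 h2
        simp only [Finset.mem_product, Finset.mem_Ico] at h1 ⊢
        exact ⟨⟨h1.2.2, h1.1, h1.2.1⟩, h2.1, h2.2⟩)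
    (by intro s h1 h2 h3
        simp only [Finset.mem_product, Finset.mem_Ico] at h1 ⊢
        exact ⟨⟨h1.2.1, h1.2.2, h1.1⟩, h2, h3⟩)]
  rw [pv_class p _ (fun t => t.2.1 < t.1 ∧ t.1 < t.2.2)
    (fun s => (s.2.1, s.1, s.2.2)) (fun t => (t.2.1, t.1, t.2.2))
    (fun s => rfl) (fun s => rfl)
    (by intro t h1 h2
        simp only [Finset.mem_product, Finset.mem_Ico] at h1 ⊢
        exact ⟨⟨h1.2.1, h1.1, h1.2.2⟩, h2.1, h2.2⟩)
    (by intro s h1 h2 h3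
        simp only [Finset.mem_product, Finset.mem_Ico] at h1 ⊢
        exact ⟨⟨h1.2.1, h1.1, h1.2.2⟩, h2, h3⟩)]
  rw [pv_class p _ (fun t => t.2.1 < t.2.2 ∧ t.2.2 < t.1)
    (fun s => (s.2.2, s.1, s.2.1)) (fun t => (t.2.1, t.2.2, t.1))
    (fun s => rfl) (fun s => rfl)
    (by intro t h1 h2
        simp only [Finset.mem_product, Finset.mem_Ico] at h1 ⊢
        exact ⟨⟨h1.2.1, h1.2.2, h1.1⟩, h2.1, h2.2⟩)
    (by intro s h1 h2 h3
        simp only [Finset.mem_product, Finset.mem_Ico] at h1 ⊢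
        exact ⟨⟨h1.2.2, h1.1, h1.2.1⟩, h2, h3⟩)]
  rw [pv_class p _ (fun t => t.2.2 < t.2.1 ∧ t.2.1 < t.1)
    (fun s => (s.2.2, s.2.1, s.1)) (fun t => (t.2.2, t.2.1, t.1))
    (fun s => rfl) (fun s => rfl)
    (by intro t h1 h2
        simp only [Finset.mem_product, Finset.mem_Ico] at h1 ⊢
        exact ⟨⟨h1.2.2, h1.2.1, h1.1⟩, h2.1, h2.2⟩)
    (by intro s h1 h2 h3
        simp only [Finset.mem_product, Finset.mem_Ico] at h1 ⊢
        exact ⟨⟨h1.2.2, h1.2.1, h1.1⟩, h2, h3⟩)]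
  rw [Finset.mul_sum]
  rw [← Finset.sum_add_distrib, ← Finset.sum_add_distrib, ← Finset.sum_add_distrib,
    ← Finset.sum_add_distrib, ← Finset.sum_add_distrib]
  apply Finset.sum_congr rfl
  intro s _
  ring

lemma pv_small_mod (p a : ℤ) (h0 : 0 ≤ a) (h1 : a < p) : a % p = a := Int.emod_eq_of_lt h0 h1

lemma pv_sub_mod (p u a : ℤ) : (u - a % p) % p = (u - a) % p := by
  rw [Int.sub_emod u (a % p), Int.emod_emod_of_dvd _ dvd_rfl, ← Int.sub_emod]

lemma pv_add_mod (p x a : ℤ) : (x + a % p) % p = (x + a) % p := by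
  rw [Int.add_comm x (a % p), Int.emod_add_emod, Int.add_comm]

lemma pv_sub_mod' (p a b : ℤ) : (a % p - b % p) % p = (a - b) % p := (Int.sub_emod a b p).symm

lemma pv_dvd_of_mod_eq (p a b : ℤ) (h : a % p = b % p) : p ∣ (a - b) :=
  Int.dvd_of_emod_eq_zero (Int.emod_eq_emod_iff_emod_sub_eq_zero.mp h)

lemma pv_eq_of_dvd_small (p a : ℤ) (h : p ∣ a) (h1 : -p < a) (h2 : a < p) : a = 0 :=
  Int.eq_zero_of_abs_lt_dvd h (abs_lt.mpr ⟨h1, h2⟩)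

lemma pv_D_trans (p : Int) (hp : 0 < p) (m : Int → Bool) :
    ∑ t ∈ (((Finset.Ico (0:ℤ) p) ×ˢ (Finset.Ico (0:ℤ) p) ×ˢ (Finset.Ico (0:ℤ) p)).filter
        (fun t => t.1 ≠ t.2.1 ∧ t.1 ≠ t.2.2 ∧ t.2.1 ≠ t.2.2)),
        (pvE m p t.1 t.2.1 * pvE m p t.2.1 t.2.2 * pvE m p t.2.2 t.1)
      = ∑ w ∈ (Finset.Ico (0:ℤ) p) ×ˢ ((Finset.Ico (1:ℤ) p ×ˢ Finset.Ico (1:ℤ) p).filter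
          (fun d => d.1 + d.2 ≠ p)),
          (pvChi m w.2.1 * pvChi m w.2.2 * pvChi m ((-w.2.1 - w.2.2) % p)) := by
  have hpne : p ≠ 0 := by omega
  apply Finset.sum_nbij'
    (i := fun t => (t.1, ((t.2.1 - t.1) % p, (t.2.2 - t.2.1) % p)))
    (j := fun w => (w.1, ((w.1 + w.2.1) % p, (w.1 + w.2.1 + w.2.2) % p)))
  · -- maps into the product
    rintro ⟨x, y, z⟩ ha
    simp only [Finset.mem_filter, Finset.mem_product, Finset.mem_Ico] at ha ⊢
    obtain ⟨⟨⟨hx0, hxp⟩, ⟨hy0, hyp⟩, hz0, hzp⟩, hxy, hxz, hyz⟩ := ha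
    have hd1nz : (y - x) % p ≠ 0 := by
      intro h
      have := pv_eq_of_dvd_small p _ (Int.dvd_of_emod_eq_zero h) (by omega) (by omega)
      omega
    have hd2nz : (z - y) % p ≠ 0 := by
      intro h
      have := pv_eq_of_dvd_small p _ (Int.dvd_of_emod_eq_zero h) (by omega) (by omega)
      omega
    have hb1 := Int.emod_nonneg (y - x) hpne
    have hb1' := Int.emod_lt_of_pos (y - x) hp
    have hb2 := Int.emod_nonneg (z - y) hpne
    have hb2' := Int.emod_lt_of_pos (z - y) hp
    refine ⟨⟨hx0, hxp⟩, ⟨⟨by omega, hb1'⟩, by omega, hb2'⟩, ?_⟩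
    -- d1 + d2 ≠ p
    intro hsum
    have hzx : (z - x) % p = 0 := by
      have h1 : ((y - x) % p + (z - y) % p) % p = (z - x) % p := by
        rw [Int.emod_add_emod, pv_add_mod]
        congr 1; ring
      rw [hsum] at h1
      simpa using h1.symm
    have := pv_eq_of_dvd_small p _ (Int.dvd_of_emod_eq_zero hzx) (by omega) (by omega)
    omega
  · -- j maps into D
    rintro ⟨x, d1, d2⟩ hw
    simp only [Finset.mem_filter, Finset.mem_product, Finset.mem_Ico] at hw ⊢
    obtain ⟨⟨hx0, hxp⟩, ⟨⟨⟨hd11, hd12⟩, hd21, hd22⟩, hne⟩⟩ := hw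
    have hy0 := Int.emod_nonneg (x + d1) hpne
    have hyp := Int.emod_lt_of_pos (x + d1) hp
    have hz0 := Int.emod_nonneg (x + d1 + d2) hpne
    have hzp := Int.emod_lt_of_pos (x + d1 + d2) hp
    refine ⟨⟨⟨hx0, hxp⟩, ⟨hy0, hyp⟩, hz0, hzp⟩, ?_, ?_, ?_⟩
    · intro h
      have hmm : (x + d1) % p = x % p := by rw [← h, pv_small_mod p x hx0 hxp]
      have hd := pv_dvd_of_mod_eq p _ _ hmm
      have : x + d1 - x = d1 := by ring
      rw [this] at hd
      have := pv_eq_of_dvd_small p _ hd (by omega) (by omega)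
      omega
    · intro h
      have hmm : (x + d1 + d2) % p = x % p := by rw [← h, pv_small_mod p x hx0 hxp]
      have hd := pv_dvd_of_mod_eq p _ _ hmm
      have heq : x + d1 + d2 - x = d1 + d2 := by ring
      rw [heq] at hd
      have hd' : p ∣ (d1 + d2 - p) := hd.sub dvd_rfl
      have := pv_eq_of_dvd_small p _ hd' (by omega) (by omega)
      omega
    · intro h
      have hd := pv_dvd_of_mod_eq p _ _ h
      have hd' : p ∣ (x + d1 - (x + d1 + d2)) := hd
      have heq : x + d1 - (x + d1 + d2) = -d2 := by ring
      rw [heq] at hd'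
      have := pv_eq_of_dvd_small p _ hd' (by omega) (by omega)
      omega
  · -- left inverse on D
    rintro ⟨x, y, z⟩ ha
    simp only [Finset.mem_filter, Finset.mem_product, Finset.mem_Ico] at ha
    obtain ⟨⟨⟨hx0, hxp⟩, ⟨hy0, hyp⟩, hz0, hzp⟩, hxy, hxz, hyz⟩ := ha
    have h1 : (x + (y - x) % p) % p = y := by
      rw [pv_add_mod]
      have : x + (y - x) = y := by ring
      rw [this, pv_small_mod p y hy0 hyp]
    have h2 : (x + (y - x) % p + (z - y) % p) % p = z := by
      rw [pv_add_mod]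
      have : (x + (y - x) % p + (z - y)) = ((z - y) + x) + (y - x) % p := by ring
      rw [this, pv_add_mod]
      have : (z - y) + x + (y - x) = z := by ring
      rw [this, pv_small_mod p z hz0 hzp]
    simp only [h1, h2]
  · -- right inverse on W
    rintro ⟨x, d1, d2⟩ hw
    simp only [Finset.mem_filter, Finset.mem_product, Finset.mem_Ico] at hw
    obtain ⟨⟨hx0, hxp⟩, ⟨⟨⟨hd11, hd12⟩, hd21, hd22⟩, hne⟩⟩ := hw
    have h1 : ((x + d1) % p - x) % p = d1 := by
      rw [Int.sub_emod ((x + d1) % p) x p, Int.emod_emod_of_dvd _ dvd_rfl, ← Int.sub_emod]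
      have : x + d1 - x = d1 := by ring
      rw [this, pv_small_mod p d1 (by omega) hd12]
    have h2 : ((x + d1 + d2) % p - (x + d1) % p) % p = d2 := by
      rw [pv_sub_mod']
      have : x + d1 + d2 - (x + d1) = d2 := by ring
      rw [this, pv_small_mod p d2 (by omega) hd22]
    simp only [h1, h2]
  · -- values agree
    rintro ⟨x, y, z⟩ ha
    simp only [Finset.mem_filter, Finset.mem_product, Finset.mem_Ico] at ha
    simp only [pvE]
    congr 2
    have h1 : (-((y - x) % p) - (z - y) % p) % p = (x - z) % p := by
      rw [pv_sub_mod]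
      have : -((y - x) % p) - (z - y) = -(z - y) - (y - x) % p := by ring
      rw [this, pv_sub_mod]
      congr 1; ring
    rw [h1]

lemma pv_c3_core (p : Int) (hp : 0 < p) (m : Int → Bool) :
    3 * (∑ i ∈ Finset.Ico (0:ℤ) p, ∑ j ∈ Finset.Ico (i+1) p, ∑ k ∈ Finset.Ico (j+1) p,
        (pvE m p i j * pvE m p j k * pvE m p k i + pvE m p i k * pvE m p k j * pvE m p j i))
      = p * ∑ d1 ∈ Finset.Ico (1:ℤ) p, (if m d1
          then ∑ d2 ∈ Finset.Ico (1:ℤ) p,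
            (if (m d2 && !(d1 + d2 == p) && m ((-d1 - d2) % p)) then (1:ℤ) else 0)
          else 0) := by
  rw [← pv_nested3 p (fun i j k =>
    pvE m p i j * pvE m p j k * pvE m p k i + pvE m p i k * pvE m p k j * pvE m p j i)]
  rw [← pv_D_split p m, pv_D_trans p hp m]
  rw [Finset.sum_product]
  have hx : ∑ x ∈ Finset.Ico (0:ℤ) p, ∑ y ∈ ((Finset.Ico (1:ℤ) p ×ˢ Finset.Ico (1:ℤ) p).filter
        (fun d => d.1 + d.2 ≠ p)),
        (pvChi m (x, y).2.1 * pvChi m (x, y).2.2 * pvChi m ((-(x, y).2.1 - (x, y).2.2) % p))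
      = ∑ _x ∈ Finset.Ico (0:ℤ) p, ∑ y ∈ ((Finset.Ico (1:ℤ) p ×ˢ Finset.Ico (1:ℤ) p).filter
        (fun d => d.1 + d.2 ≠ p)),
        (pvChi m y.1 * pvChi m y.2 * pvChi m ((-y.1 - y.2) % p)) := rfl
  rw [hx, Finset.sum_const]
  have hcard : ((Finset.Ico (0:ℤ) p).card : ℤ) = p := by
    rw [Int.card_Ico]; omega
  rw [nsmul_eq_mul, hcard]
  congr 1
  rw [Finset.sum_filter, Finset.sum_product]
  apply Finset.sum_congr rfl
  intro d1 _
  by_cases h1 : m d1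
  · rw [if_pos h1]
    apply Finset.sum_congr rfl
    intro d2 _
    by_cases h2 : m d2 <;> by_cases h3 : d1 + d2 = p <;>
      by_cases h4 : m ((-d1 - d2) % p) <;>
      simp [pvChi, h1, h2, h3, h4]
  · rw [if_neg h1, Finset.sum_eq_zero]
    intro d2 _
    simp [pvChi, h1]

lemma pv_c3_ports (p : Int) (hp : 0 < p) (sset : PySem.Set Int) :
    ((PySem.List.pyRange 0 p 1).foldl (fun c3 i =>
      (PySem.List.pyRange (i + 1) p 1).foldl (fun c3 j =>
        (PySem.List.pyRange (j + 1) p 1).foldl (fun c3 k =>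
          let d_ij := PySem.Set.contains sset (PySem.Int.mod (j - i) p)
          let d_jk := PySem.Set.contains sset (PySem.Int.mod (k - j) p)
          let d_ki := PySem.Set.contains sset (PySem.Int.mod (i - k) p)
          let d_ji := PySem.Set.contains sset (PySem.Int.mod (i - j) p)
          let d_kj := PySem.Set.contains sset (PySem.Int.mod (j - k) p)
          let d_ik := PySem.Set.contains sset (PySem.Int.mod (k - i) p)
          let c3 := if d_ij && d_jk && d_ki then c3 + 1 else c3
          if d_ik && d_kj && d_ji then c3 + 1 else c3) c3) c3) 0)
    = PySem.Int.floordiv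
        (p * ((PySem.List.pyRange 1 p 1).foldl (fun w3 d1 =>
          if PySem.Set.contains sset d1 then
            (PySem.List.pyRange 1 p 1).foldl (fun w3 d2 =>
              if PySem.Set.contains sset d2 && !(d1 + d2 == p) &&
                  PySem.Set.contains sset (PySem.Int.mod (-d1 - d2) p) then w3 + 1 else w3) w3
          else w3) 0)) 3 := by
  set m : Int → Bool := PySem.Set.contains sset with hm
  -- innermost loop of A
  have hin : ∀ (i j : ℤ) (acc : ℤ), (PySem.List.pyRange (j + 1) p 1).foldl (fun c3 k =>
      let d_ij := m (PySem.Int.mod (j - i) p)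
      let d_jk := m (PySem.Int.mod (k - j) p)
      let d_ki := m (PySem.Int.mod (i - k) p)
      let d_ji := m (PySem.Int.mod (i - j) p)
      let d_kj := m (PySem.Int.mod (j - k) p)
      let d_ik := m (PySem.Int.mod (k - i) p)
      let c3 := if d_ij && d_jk && d_ki then c3 + 1 else c3
      if d_ik && d_kj && d_ji then c3 + 1 else c3) acc
      = acc + ∑ k ∈ Finset.Ico (j+1) p,
          (pvE m p i j * pvE m p j k * pvE m p k i + pvE m p i k * pvE m p k j * pvE m p j i) := by
    intro i j acc
    rw [PySem.List.foldl_congr_mem _ _ (fun c3 k =>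
      c3 + ((if (m ((j - i) % p) && m ((k - j) % p) && m ((i - k) % p)) then (1:ℤ) else 0)
        + (if (m ((k - i) % p) && m ((j - k) % p) && m ((i - j) % p)) then (1:ℤ) else 0))) _ ?_]
    · rw [PySem.List.foldl_add, pv_sum_pyRange]
      congr 1
      apply Finset.sum_congr rfl
      intro k _
      rw [pv_ite_and3, pv_ite_and3]
      rfl
    · intro acc' k _
      simp only [PySem.Int.mod_eq_emod_of_pos hp]
      by_cases h1 : (m ((j - i) % p) && m ((k - j) % p) && m ((i - k) % p)) <;>
        by_cases h2 : (m ((k - i) % p) && m ((j - k) % p) && m ((i - j) % p)) <;>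
        simp only [h1, h2, if_pos, if_neg, Bool.false_eq_true, if_true, if_false] <;> ring
  -- middle loop of A
  have hmid : ∀ (i : ℤ) (acc : ℤ), (PySem.List.pyRange (i + 1) p 1).foldl (fun c3 j =>
      (PySem.List.pyRange (j + 1) p 1).foldl (fun c3 k =>
        let d_ij := m (PySem.Int.mod (j - i) p)
        let d_jk := m (PySem.Int.mod (k - j) p)
        let d_ki := m (PySem.Int.mod (i - k) p)
        let d_ji := m (PySem.Int.mod (i - j) p)
        let d_kj := m (PySem.Int.mod (j - k) p)
        let d_ik := m (PySem.Int.mod (k - i) p)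
        let c3 := if d_ij && d_jk && d_ki then c3 + 1 else c3
        if d_ik && d_kj && d_ji then c3 + 1 else c3) c3) acc
      = acc + ∑ j ∈ Finset.Ico (i+1) p, ∑ k ∈ Finset.Ico (j+1) p,
          (pvE m p i j * pvE m p j k * pvE m p k i + pvE m p i k * pvE m p k j * pvE m p j i) := by
    intro i acc
    rw [PySem.List.foldl_congr_mem _ _ (fun c3 j =>
      c3 + ∑ k ∈ Finset.Ico (j+1) p,
        (pvE m p i j * pvE m p j k * pvE m p k i + pvE m p i k * pvE m p k j * pvE m p j i)) _ ?_]
    · rw [PySem.List.foldl_add, pv_sum_pyRange]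
    · intro acc' j _
      exact hin i j acc'
  have hA : (PySem.List.pyRange 0 p 1).foldl (fun c3 i =>
      (PySem.List.pyRange (i + 1) p 1).foldl (fun c3 j =>
        (PySem.List.pyRange (j + 1) p 1).foldl (fun c3 k =>
          let d_ij := m (PySem.Int.mod (j - i) p)
          let d_jk := m (PySem.Int.mod (k - j) p)
          let d_ki := m (PySem.Int.mod (i - k) p)
          let d_ji := m (PySem.Int.mod (i - j) p)
          let d_kj := m (PySem.Int.mod (j - k) p)
          let d_ik := m (PySem.Int.mod (k - i) p)
          let c3 := if d_ij && d_jk && d_ki then c3 + 1 else c3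
          if d_ik && d_kj && d_ji then c3 + 1 else c3) c3) c3) 0
      = ∑ i ∈ Finset.Ico (0:ℤ) p, ∑ j ∈ Finset.Ico (i+1) p, ∑ k ∈ Finset.Ico (j+1) p,
          (pvE m p i j * pvE m p j k * pvE m p k i + pvE m p i k * pvE m p k j * pvE m p j i) := by
    rw [PySem.List.foldl_congr_mem _ _ (fun c3 i =>
      c3 + ∑ j ∈ Finset.Ico (i+1) p, ∑ k ∈ Finset.Ico (j+1) p,
        (pvE m p i j * pvE m p j k * pvE m p k i + pvE m p i k * pvE m p k j * pvE m p j i)) _ ?_]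
    · rw [PySem.List.foldl_add, pv_sum_pyRange]; simp
    · intro acc' i _
      exact hmid i acc'
  -- B's w3 loop
  have hBin : ∀ (d1 : ℤ) (acc : ℤ), (PySem.List.pyRange 1 p 1).foldl (fun w3 d2 =>
      if m d2 && !(d1 + d2 == p) && m (PySem.Int.mod (-d1 - d2) p) then w3 + 1 else w3) acc
      = acc + ∑ d2 ∈ Finset.Ico (1:ℤ) p,
          (if (m d2 && !(d1 + d2 == p) && m ((-d1 - d2) % p)) then (1:ℤ) else 0) := by
    intro d1 acc
    rw [PySem.List.foldl_congr_mem _ _ (fun w3 d2 =>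
      w3 + (if (m d2 && !(d1 + d2 == p) && m ((-d1 - d2) % p)) then (1:ℤ) else 0)) _ ?_]
    · rw [PySem.List.foldl_add, pv_sum_pyRange]
    · intro acc' d2 _
      simp only [PySem.Int.mod_eq_emod_of_pos hp]
      split_ifs <;> ring
  have hB : (PySem.List.pyRange 1 p 1).foldl (fun w3 d1 =>
      if m d1 then
        (PySem.List.pyRange 1 p 1).foldl (fun w3 d2 =>
          if m d2 && !(d1 + d2 == p) && m (PySem.Int.mod (-d1 - d2) p) then w3 + 1 else w3) w3
      else w3) 0
      = ∑ d1 ∈ Finset.Ico (1:ℤ) p, (if m d1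
          then ∑ d2 ∈ Finset.Ico (1:ℤ) p,
            (if (m d2 && !(d1 + d2 == p) && m ((-d1 - d2) % p)) then (1:ℤ) else 0)
          else 0) := by
    rw [PySem.List.foldl_congr_mem _ _ (fun w3 d1 =>
      w3 + (if m d1
        then ∑ d2 ∈ Finset.Ico (1:ℤ) p,
          (if (m d2 && !(d1 + d2 == p) && m ((-d1 - d2) % p)) then (1:ℤ) else 0)
        else 0)) _ ?_]
    · rw [PySem.List.foldl_add, pv_sum_pyRange]; simp
    · intro acc' d1 _
      by_cases h : m d1 = true
      · simp only [h, if_true]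
        exact hBin d1 acc'
      · simp only [h, Bool.false_eq_true, if_false]; ring
  rw [hA, hB]
  have hkey := pv_c3_core p hp m
  rw [← hkey]
  rw [PySem.Int.floordiv_eq_ediv_of_pos (by norm_num : (0:ℤ) < 3)]
  rw [Int.mul_ediv_cancel_left _ (by norm_num : (3:ℤ) ≠ 0)]

lemma pv_perm_zero_sum (F : List Int → Int) (ys : List Int) :
    ((PySem.List.permutations ys 0).map F).sum = F [] := by
  simp [PySem.List.permutations_zero]

lemma pv_step4 (ys : List Int) (hnd : ys.Nodup) (F : List Int → Int) :
    ((PySem.List.permutations ys 4).map F).sum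
      = (ys.map (fun a =>
          ((ys.filter (· != a)).map (fun b =>
            (((ys.filter (· != a)).filter (· != b)).map (fun c =>
              ((((ys.filter (· != a)).filter (· != b)).filter (· != c)).map (fun d =>
                F [a, b, c, d])).sum)).sum)).sum)).sum := by
  rw [show (4:Nat) = 3 + 1 from rfl, pv_step ys hnd 3 F]
  apply congrArg List.sum (List.map_congr_left ?_)
  intro a _
  rw [hnd.erase_eq_filter a]
  have hnd1 : (ys.filter (· != a)).Nodup := hnd.filter _
  rw [show (3:Nat) = 2 + 1 from rfl, pv_step _ hnd1 2 _]
  apply congrArg List.sum (List.map_congr_left ?_)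
  intro b _
  rw [hnd1.erase_eq_filter b]
  have hnd2 : ((ys.filter (· != a)).filter (· != b)).Nodup := hnd1.filter _
  rw [show (2:Nat) = 1 + 1 from rfl, pv_step _ hnd2 1 _]
  apply congrArg List.sum (List.map_congr_left ?_)
  intro c _
  rw [hnd2.erase_eq_filter c]
  have hnd3 : (((ys.filter (· != a)).filter (· != b)).filter (· != c)).Nodup := hnd2.filter _
  rw [show (1:Nat) = 0 + 1 from rfl, pv_step _ hnd3 0 _]
  apply congrArg List.sum (List.map_congr_left ?_)
  intro d _
  rw [pv_perm_zero_sum]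

lemma pv_c5_ports (p : Int) (hp : 0 < p) (sset : PySem.Set Int) :
    ((PySem.List.combinations (PySem.List.pyRange 1 p 1) 4).foldl (fun c5 subset =>
      let verts : List Int := 0 :: subset
      (PySem.List.permutations verts verts.length).foldl (fun c5 perm =>
        if PySem.List.pyGetD perm 0 0 ≠ 0 then c5
        else
          let is_cycle := (PySem.List.pyRange 0 5 1).foldl (fun ic idx =>
            if ic then
              let a := PySem.List.pyGetD perm idx 0
              let b := PySem.List.pyGetD perm (PySem.Int.mod (idx + 1) 5) 0
              if PySem.Set.contains sset (PySem.Int.mod (b - a) p) then ic else false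
            else ic) true
          if is_cycle then c5 + 1 else c5) c5) (0:ℤ))
    = ((PySem.List.pyRange 1 p 1).foldl (fun m0 a =>
        if PySem.Set.contains sset a then
          (PySem.List.pyRange 1 p 1).foldl (fun m0 b =>
            if !(b == a) && PySem.Set.contains sset (PySem.Int.mod (b - a) p) then
              (PySem.List.pyRange 1 p 1).foldl (fun m0 c =>
                if !(c == a) && !(c == b) && PySem.Set.contains sset (PySem.Int.mod (c - b) p) then
                  (PySem.List.pyRange 1 p 1).foldl (fun m0 d =>
                    if !(d == a) && !(d == b) && !(d == c) &&
                        PySem.Set.contains sset (PySem.Int.mod (d - c) p) &&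
                        PySem.Set.contains sset (PySem.Int.mod (-d) p) then m0 + 1 else m0) m0
                else m0) m0
            else m0) m0
        else m0) (0:ℤ)) := by
  set m : Int → Bool := PySem.Set.contains sset with hm
  set R : List Int := PySem.List.pyRange 1 p 1 with hR
  have hndR : R.Nodup := PySem.List.nodup_pyRange_one 1 p
  have hmemR : ∀ x ∈ R, 1 ≤ x ∧ x < p := by
    intro x hx; rw [hR] at hx; exact PySem.List.mem_pyRange_one.mp hx
  -- ===== A side =====
  have hA1 : ∀ (subset : List Int) (acc : ℤ),
      (PySem.List.permutations ((0:ℤ) :: subset) ((0:ℤ) :: subset).length).foldl (fun c5 perm =>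
        if PySem.List.pyGetD perm 0 0 ≠ 0 then c5
        else
          let is_cycle := (PySem.List.pyRange 0 5 1).foldl (fun ic idx =>
            if ic then
              let a := PySem.List.pyGetD perm idx 0
              let b := PySem.List.pyGetD perm (PySem.Int.mod (idx + 1) 5) 0
              if m (PySem.Int.mod (b - a) p) then ic else false
            else ic) true
          if is_cycle then c5 + 1 else c5) acc
      = acc + ((PySem.List.permutations ((0:ℤ) :: subset) (subset.length + 1)).map
          (fun perm => if PySem.List.pyGetD perm 0 0 ≠ 0 then 0
            else (if pvIC m p perm then (1:ℤ) else 0))).sum := by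
    intro subset acc
    rw [PySem.List.foldl_congr_mem _ _ (fun c5 perm =>
      c5 + (if PySem.List.pyGetD perm 0 0 ≠ 0 then 0
        else (if pvIC m p perm then (1:ℤ) else 0))) _ ?_]
    · rw [PySem.List.foldl_add, List.length_cons]
    · intro acc' perm _
      show (if PySem.List.pyGetD perm 0 0 ≠ 0 then acc'
        else if pvIC m p perm then acc' + 1 else acc') = _
      split_ifs with h1 h2
      · simp [h1]
      · simp [h1, h2]
      · simp [h1, h2]
  have hA2 : ((PySem.List.combinations R 4).foldl (fun c5 subset =>
      let verts : List Int := 0 :: subset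
      (PySem.List.permutations verts verts.length).foldl (fun c5 perm =>
        if PySem.List.pyGetD perm 0 0 ≠ 0 then c5
        else
          let is_cycle := (PySem.List.pyRange 0 5 1).foldl (fun ic idx =>
            if ic then
              let a := PySem.List.pyGetD perm idx 0
              let b := PySem.List.pyGetD perm (PySem.Int.mod (idx + 1) 5) 0
              if m (PySem.Int.mod (b - a) p) then ic else false
            else ic) true
          if is_cycle then c5 + 1 else c5) c5) 0)
      = ((PySem.List.combinations R 4).map (fun subset =>
          ((PySem.List.permutations ((0:ℤ) :: subset) (subset.length + 1)).map
            (fun perm => if PySem.List.pyGetD perm 0 0 ≠ 0 then 0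
              else (if pvIC m p perm then (1:ℤ) else 0))).sum)).sum := by
    rw [PySem.List.foldl_congr_mem _ _ (fun c5 subset =>
      c5 + ((PySem.List.permutations ((0:ℤ) :: subset) (subset.length + 1)).map
          (fun perm => if PySem.List.pyGetD perm 0 0 ≠ 0 then 0
            else (if pvIC m p perm then (1:ℤ) else 0))).sum) _ ?_]
    · rw [PySem.List.foldl_add]; simp
    · intro acc subset _
      exact hA1 subset acc
  have hA3 : ((PySem.List.combinations R 4).map (fun subset =>
        ((PySem.List.permutations ((0:ℤ) :: subset) (subset.length + 1)).map
          (fun perm => if PySem.List.pyGetD perm 0 0 ≠ 0 then 0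
            else (if pvIC m p perm then (1:ℤ) else 0))).sum)).sum
      = ((PySem.List.permutations R 4).map
          (fun q => if pvIC m p ((0:ℤ) :: q) then (1:ℤ) else 0)).sum := by
    rw [← pv_big R hndR 4]
    apply congrArg List.sum (List.map_congr_left ?_)
    intro cs hcs
    obtain ⟨hsubl, hlen⟩ := (PySem.List.mem_combinations_iff R 4 cs).mp hcs
    have h0 : (0:ℤ) ∉ cs := fun h => by
      have := (hmemR 0 (hsubl.subset h)).1
      omega
    rw [pv_he cs h0 (fun q => if pvIC m p q then (1:ℤ) else 0), hlen]
  -- ===== B side =====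
  have hB4 : ∀ (a b c : ℤ) (acc : ℤ), R.foldl (fun m0 d =>
      if !(d == a) && !(d == b) && !(d == c) && m (PySem.Int.mod (d - c) p) &&
          m (PySem.Int.mod (-d) p) then m0 + 1 else m0) acc
      = acc + (R.map (fun d => if !(d == a) && !(d == b) && !(d == c) &&
          m (PySem.Int.mod (d - c) p) && m (PySem.Int.mod (-d) p) then (1:ℤ) else 0)).sum := by
    intro a b c acc
    rw [PySem.List.foldl_if_add_one, ← PySem.List.sum_map_ite_one_zero]
  have hB3 : ∀ (a b : ℤ) (acc : ℤ), R.foldl (fun m0 c =>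
      if !(c == a) && !(c == b) && m (PySem.Int.mod (c - b) p) then
        R.foldl (fun m0 d =>
          if !(d == a) && !(d == b) && !(d == c) && m (PySem.Int.mod (d - c) p) &&
              m (PySem.Int.mod (-d) p) then m0 + 1 else m0) m0
      else m0) acc
      = acc + (R.map (fun c => if !(c == a) && !(c == b) && m (PySem.Int.mod (c - b) p)
          then (R.map (fun d => if !(d == a) && !(d == b) && !(d == c) &&
            m (PySem.Int.mod (d - c) p) && m (PySem.Int.mod (-d) p) then (1:ℤ) else 0)).sum
          else 0)).sum := by
    intro a b acc
    rw [PySem.List.foldl_congr_mem _ _ (fun m0 c =>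
      m0 + (if !(c == a) && !(c == b) && m (PySem.Int.mod (c - b) p)
        then (R.map (fun d => if !(d == a) && !(d == b) && !(d == c) &&
          m (PySem.Int.mod (d - c) p) && m (PySem.Int.mod (-d) p) then (1:ℤ) else 0)).sum
        else 0)) _ ?_]
    · rw [PySem.List.foldl_add]
    · intro acc' c _
      by_cases h : (!(c == a) && !(c == b) && m (PySem.Int.mod (c - b) p)) = true
      · simp only [h, if_true]
        exact hB4 a b c acc'
      · simp only [h, Bool.false_eq_true, if_false]; ring
  have hB2 : ∀ (a : ℤ) (acc : ℤ), R.foldl (fun m0 b =>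
      if !(b == a) && m (PySem.Int.mod (b - a) p) then
        R.foldl (fun m0 c =>
          if !(c == a) && !(c == b) && m (PySem.Int.mod (c - b) p) then
            R.foldl (fun m0 d =>
              if !(d == a) && !(d == b) && !(d == c) && m (PySem.Int.mod (d - c) p) &&
                  m (PySem.Int.mod (-d) p) then m0 + 1 else m0) m0
          else m0) m0
      else m0) acc
      = acc + (R.map (fun b => if !(b == a) && m (PySem.Int.mod (b - a) p)
          then (R.map (fun c => if !(c == a) && !(c == b) && m (PySem.Int.mod (c - b) p)
            then (R.map (fun d => if !(d == a) && !(d == b) && !(d == c) &&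
              m (PySem.Int.mod (d - c) p) && m (PySem.Int.mod (-d) p) then (1:ℤ) else 0)).sum
            else 0)).sum
          else 0)).sum := by
    intro a acc
    rw [PySem.List.foldl_congr_mem _ _ (fun m0 b =>
      m0 + (if !(b == a) && m (PySem.Int.mod (b - a) p)
        then (R.map (fun c => if !(c == a) && !(c == b) && m (PySem.Int.mod (c - b) p)
          then (R.map (fun d => if !(d == a) && !(d == b) && !(d == c) &&
            m (PySem.Int.mod (d - c) p) && m (PySem.Int.mod (-d) p) then (1:ℤ) else 0)).sum
          else 0)).sum
        else 0)) _ ?_]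
    · rw [PySem.List.foldl_add]
    · intro acc' b _
      by_cases h : (!(b == a) && m (PySem.Int.mod (b - a) p)) = true
      · simp only [h, if_true]
        exact hB3 a b acc'
      · simp only [h, Bool.false_eq_true, if_false]; ring
  have hB1 : R.foldl (fun m0 a =>
      if m a then
        R.foldl (fun m0 b =>
          if !(b == a) && m (PySem.Int.mod (b - a) p) then
            R.foldl (fun m0 c =>
              if !(c == a) && !(c == b) && m (PySem.Int.mod (c - b) p) then
                R.foldl (fun m0 d =>
                  if !(d == a) && !(d == b) && !(d == c) && m (PySem.Int.mod (d - c) p) &&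
                      m (PySem.Int.mod (-d) p) then m0 + 1 else m0) m0
              else m0) m0
          else m0) m0
      else m0) 0
      = (R.map (fun a => if m a
          then (R.map (fun b => if !(b == a) && m (PySem.Int.mod (b - a) p)
            then (R.map (fun c => if !(c == a) && !(c == b) && m (PySem.Int.mod (c - b) p)
              then (R.map (fun d => if !(d == a) && !(d == b) && !(d == c) &&
                m (PySem.Int.mod (d - c) p) && m (PySem.Int.mod (-d) p) then (1:ℤ) else 0)).sum
              else 0)).sum
            else 0)).sum
          else 0)).sum := by
    rw [PySem.List.foldl_congr_mem _ _ (fun m0 a =>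
      m0 + (if m a
        then (R.map (fun b => if !(b == a) && m (PySem.Int.mod (b - a) p)
          then (R.map (fun c => if !(c == a) && !(c == b) && m (PySem.Int.mod (c - b) p)
            then (R.map (fun d => if !(d == a) && !(d == b) && !(d == c) &&
              m (PySem.Int.mod (d - c) p) && m (PySem.Int.mod (-d) p) then (1:ℤ) else 0)).sum
            else 0)).sum
          else 0)).sum
        else 0)) _ ?_]
    · rw [PySem.List.foldl_add]; simp
    · intro acc' a _
      by_cases h : m a = true
      · simp only [h, if_true]
        exact hB2 a acc'
      · simp only [h, Bool.false_eq_true, if_false]; ring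
  -- ===== assemble =====
  refine ((hA2.trans hA3).trans
    (pv_step4 R hndR (fun q => if pvIC m p ((0:ℤ) :: q) then (1:ℤ) else 0))).trans ?_
  rw [hB1]
  simp only [pv_sum_filter]
  apply congrArg List.sum (List.map_congr_left ?_)
  intro a ha
  obtain ⟨ha1, ha2⟩ := hmemR a ha
  have haeq : PySem.Int.mod (a - 0) p = a := by
    rw [PySem.Int.mod_eq_emod_of_pos hp, sub_zero]
    exact pv_small_mod p a (by omega) ha2
  have h0d : ∀ d : ℤ, (0:ℤ) - d = -d := fun d => by ring
  by_cases hma : m a = true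
  · simp only [hma, if_true]
    apply congrArg List.sum (List.map_congr_left ?_)
    intro b hb
    by_cases hba : b = a
    · simp [hba]
    · have hbne : (b != a) = true := by simp [hba]
      have hbeq : (!(b == a)) = true := by simp [hba]
      simp only [hbne, hbeq, if_true, Bool.true_and]
      by_cases hm2 : m (PySem.Int.mod (b - a) p) = true
      · simp only [hm2, if_true]
        apply congrArg List.sum (List.map_congr_left ?_)
        intro c hc
        by_cases hca : c = a
        · simp [hca]
        · by_cases hcb : c = b
          · simp [hcb]
          · have hcne1 : (c != a) = true := by simp [hca]
            have hcne2 : (c != b) = true := by simp [hcb]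
            have hceq1 : (!(c == a)) = true := by simp [hca]
            have hceq2 : (!(c == b)) = true := by simp [hcb]
            simp only [hcne1, hcne2, hceq1, hceq2, if_true, Bool.true_and]
            by_cases hm3 : m (PySem.Int.mod (c - b) p) = true
            · simp only [hm3, if_true]
              apply congrArg List.sum (List.map_congr_left ?_)
              intro d hd
              rw [pvIC_eval, haeq, h0d d]
              by_cases hda : d = a
              · simp [hda]
              · by_cases hdb : d = b
                · simp [hdb]
                · by_cases hdc : d = c
                  · simp [hdc]
                  · simp [hda, hdb, hdc, hma, hm2, hm3]
            · simp only [hm3, Bool.false_eq_true, if_false]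
              apply List.sum_eq_zero
              intro v hv
              simp only [List.mem_map] at hv
              obtain ⟨d, -, rfl⟩ := hv
              rw [pvIC_eval]
              simp [hm3]
      · simp only [hm2, Bool.false_eq_true, if_false]
        apply List.sum_eq_zero
        intro v hv
        simp only [List.mem_map] at hv
        obtain ⟨c, -, rfl⟩ := hv
        split_ifs with h1 h2
        · apply List.sum_eq_zero
          intro v hv
          simp only [List.mem_map] at hv
          obtain ⟨d, -, rfl⟩ := hv
          rw [pvIC_eval]
          simp [hm2]
        · rfl
        · rfl
  · have hma' : m a = false := by simpa using hma
    simp only [hma', Bool.false_eq_true, if_false]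
    have hF0 : ∀ b c d : ℤ, (if pvIC m p [0, a, b, c, d] then (1:ℤ) else 0) = 0 := by
      intro b c d
      rw [pvIC_eval, haeq]
      simp [hma']
    apply List.sum_eq_zero
    intro v hv
    simp only [List.mem_map] at hv
    obtain ⟨b, -, rfl⟩ := hv
    split_ifs with h1
    · apply List.sum_eq_zero
      intro v hv
      simp only [List.mem_map] at hv
      obtain ⟨c, -, rfl⟩ := hv
      split_ifs with h2 h3
      · apply List.sum_eq_zero
        intro v hv
        simp only [List.mem_map] at hv
        obtain ⟨d, -, rfl⟩ := hv
        split_ifs with h4 h5 h6 h7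
        · have := hF0 b c d
          rw [if_pos h7] at this
          exact this
        · rfl
        · rfl
        · rfl
        · rfl
      · rfl
      · rfl
    · rfl

-- ===== VERDICT (by name: the statement is the Claim_ definition above) =====
theorem compute_c3_c5_fast_spec : Claim_equal_compute_c3_c5_fast := by
  intro p S _
  unfold Spec_compute_c3_c5_fast
  by_cases hp : 0 < p
  · simp only [compute_c3_c5_fast, compute_c3_c5_fast_alt]
    rw [pv_c3_ports p hp (PySem.Set.ofList S), pv_c5_ports p hp (PySem.Set.ofList S)]
  · have h1 : PySem.List.pyRange 0 p 1 = [] := PySem.List.pyRange_one_eq_nil (by omega)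
    have h2 : PySem.List.pyRange 1 p 1 = [] := PySem.List.pyRange_one_eq_nil (by omega)
    have hc : PySem.List.combinations ([] : List Int) 4 = [] := by decide
    have hf3 : PySem.Int.floordiv 0 3 = 0 := by decide
    have hf5 : PySem.Int.floordiv 0 5 = 0 := by decide
    simp [compute_c3_c5_fast, compute_c3_c5_fast_alt, h1, h2, hc, hf3, hf5]
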